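-- pv_equiv track=rewrite | github.com/mksong76/icx | icx/preps/prep.py | search_prep
-- ===== SOURCE A (Python) =====
-- def search_prep(prep_info:dict, key: str) -> any:
--     preps = []
--     for addr, prep in prep_info.items():
--         if addr == key:
--             return prep
--         elif prep.get('address', '') == key:
--             return prep
--         elif key in prep.get('p2p', ''):
--             preps.append(prep)
--         elif key.lower() in prep.get('name', '').lower():
--             preps.append(prep)
--     if len(preps) > 0:
--         return preps[0]
--     return None
-- ===== SOURCE B (Python) =====
-- def search_prep(prep_info: dict, key: str) -> any:
--     # pass 1: exact match on address (dict key or 'address' field)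
--     for addr, prep in prep_info.items():
--         if addr == key or prep.get('address', '') == key:
--             return prep
--     # pass 2: first partial match on p2p or case-insensitive name
--     for prep in prep_info.values():
--         if key in prep.get('p2p', '') or key.lower() in prep.get('name', '').lower():
--             return prep
--     return None
-- ===== Notes on version B (the rewrite author's own statement) =====
-- stated objective: simpler
-- what changed: Replaces the single accumulating loop (which collects partial matches in a list while scanning for exact matches) with two separate ordered passes: first scan returns the first exact address match, second scan returns the first p2p/name partial match; no accumulator list is kept.
import Mathlib
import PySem

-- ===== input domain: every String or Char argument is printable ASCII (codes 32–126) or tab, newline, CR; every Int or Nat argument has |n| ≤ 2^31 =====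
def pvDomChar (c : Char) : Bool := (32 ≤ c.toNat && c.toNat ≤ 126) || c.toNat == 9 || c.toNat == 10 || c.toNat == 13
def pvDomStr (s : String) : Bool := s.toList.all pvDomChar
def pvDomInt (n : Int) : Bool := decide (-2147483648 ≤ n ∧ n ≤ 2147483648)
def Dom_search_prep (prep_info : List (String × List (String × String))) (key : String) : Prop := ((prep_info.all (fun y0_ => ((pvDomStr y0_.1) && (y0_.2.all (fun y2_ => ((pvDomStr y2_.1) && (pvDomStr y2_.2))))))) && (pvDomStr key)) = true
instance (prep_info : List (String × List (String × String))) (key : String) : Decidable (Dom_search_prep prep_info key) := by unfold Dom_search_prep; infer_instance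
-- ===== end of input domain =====

-- B replaces A's single accumulating loop by two ordered passes (exact scan, then partial scan); simpler, same cost.

-- ===== PORT A =====
-- the loop of A: scans items, early-returns on exact match, accumulates partial matches in `preps`
def searchPrepGo (key : String) (l : List (String × List (String × String)))
    (preps : List (List (String × String))) : Option (List (String × String)) :=
  match l with
  | [] => preps.head?          -- `if len(preps) > 0: return preps[0]; return None`
  | (addr, prep) :: rest =>
    if addr == key then some prep
    else if PySem.Dict.getD ⟨prep⟩ "address" "" == key then some prep
    else if PySem.Str.isIn key (PySem.Dict.getD ⟨prep⟩ "p2p" "") then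
      searchPrepGo key rest (preps ++ [prep])
    else if PySem.Str.isIn (PySem.Str.lower key) (PySem.Str.lower (PySem.Dict.getD ⟨prep⟩ "name" "")) then
      searchPrepGo key rest (preps ++ [prep])
    else searchPrepGo key rest preps

def search_prep (prep_info : List (String × List (String × String))) (key : String) : Option (List (String × String)) :=
  searchPrepGo key prep_info []

-- ===== PORT B =====
-- pass 1 of Source B: first exact address match
def findExact (key : String) (l : List (String × List (String × String))) : Option (List (String × String)) :=
  match l with
  | [] => none
  | (addr, prep) :: rest =>
    if addr == key || PySem.Dict.getD ⟨prep⟩ "address" "" == key then some prep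
    else findExact key rest

-- pass 2 of Source B: first p2p / case-insensitive name partial match
def findPartial (key : String) (l : List (String × List (String × String))) : Option (List (String × String)) :=
  match l with
  | [] => none
  | (_, prep) :: rest =>
    if PySem.Str.isIn key (PySem.Dict.getD ⟨prep⟩ "p2p" "")
        || PySem.Str.isIn (PySem.Str.lower key) (PySem.Str.lower (PySem.Dict.getD ⟨prep⟩ "name" "")) then
      some prep
    else findPartial key rest

def search_prep_alt (prep_info : List (String × List (String × String))) (key : String) : Option (List (String × String)) :=
  match findExact key prep_info with
  | some prep => some prep
  | none => findPartial key prep_info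

-- ===== PRECONDITION & SPEC =====
def Spec_search_prep (prep_info : List (String × List (String × String))) (key : String) (out : Option (List (String × String))) : Prop := out = search_prep_alt prep_info key
instance (prep_info : List (String × List (String × String))) (key : String) (out : Option (List (String × String))) : Decidable (Spec_search_prep prep_info key out) := by unfold Spec_search_prep; infer_instance

-- ===== CLAIM (what is proved, stated in full; the proofs are below) =====
def Claim_equal_search_prep : Prop := ∀ (prep_info : List (String × List (String × String))) (key : String), Dom_search_prep prep_info key → Spec_search_prep prep_info key (search_prep prep_info key)

-- ===== LEMMAS AND PROOFS =====
theorem searchPrepGo_eq (key : String) (l : List (String × List (String × String))) :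
    ∀ preps, searchPrepGo key l preps =
      match findExact key l with
      | some prep => some prep
      | none => preps.head?.or (findPartial key l) := by
  induction l with
  | nil => intro preps; simp [searchPrepGo, findExact, findPartial]
  | cons hd rest ih =>
    intro preps
    obtain ⟨addr, prep⟩ := hd
    simp only [searchPrepGo, findExact, findPartial]
    by_cases h1 : addr == key
    · simp [h1]
    · by_cases h2 : PySem.Dict.getD ⟨prep⟩ "address" "" == key
      · simp [h1, h2]
      · by_cases h3 : PySem.Str.isIn key (PySem.Dict.getD ⟨prep⟩ "p2p" "")
        · simp only [h1, h2, h3, Bool.false_or, if_true, ih]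
          cases hfe : findExact key rest <;> cases preps <;> simp
        · by_cases h4 : PySem.Str.isIn (PySem.Str.lower key)
              (PySem.Str.lower (PySem.Dict.getD ⟨prep⟩ "name" ""))
          · simp only [h1, h2, h3, h4, Bool.false_or, if_true, ih]
            cases hfe : findExact key rest <;> cases preps <;> simp
          · simp only [PySem.Str.isIn_eq, PySem.Str.toList_lower] at h3 h4
            simp [h1, h2, h3, h4, ih]

-- ===== VERDICT (by name: the statement is the Claim_ definition above) =====
theorem search_prep_spec : Claim_equal_search_prep := by
  intro prep_info key _
  unfold Spec_search_prep search_prep search_prep_alt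
  rw [searchPrepGo_eq]
  cases findExact key prep_info <;> simp
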